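-- pv_equiv track=rewrite | github.com/thanglq150188/libra-core | libra/response/streams.py | tokens_from
-- ===== SOURCE A (Python) =====
-- from typing import Dict, List, Tuple
--
-- def tokens_from(text: str) -> List[str]: # type: ignore
--     tokens = text.split(' ')
--     output_tokens = []
--     for token in tokens:
--         output_tokens.append(token)
--         output_tokens.append(' ')
--     output_tokens = output_tokens[:-1]
--     return output_tokens
-- ===== SOURCE B (Python) =====
-- def tokens_from(text):
--     output_tokens = []
--     cur = []
--     for ch in text:
--         if ch == ' ':
--             output_tokens.append(''.join(cur))
--             output_tokens.append(' ')
--             cur = []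
--         else:
--             cur.append(ch)
--     output_tokens.append(''.join(cur))
--     return output_tokens
-- ===== Notes on version B (the rewrite author's own statement) =====
-- stated objective: alternative
-- what changed: B makes a single character-level pass building tokens in place, instead of A's split-then-interleave-then-drop-trailing-separator pipeline.
import Mathlib
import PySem

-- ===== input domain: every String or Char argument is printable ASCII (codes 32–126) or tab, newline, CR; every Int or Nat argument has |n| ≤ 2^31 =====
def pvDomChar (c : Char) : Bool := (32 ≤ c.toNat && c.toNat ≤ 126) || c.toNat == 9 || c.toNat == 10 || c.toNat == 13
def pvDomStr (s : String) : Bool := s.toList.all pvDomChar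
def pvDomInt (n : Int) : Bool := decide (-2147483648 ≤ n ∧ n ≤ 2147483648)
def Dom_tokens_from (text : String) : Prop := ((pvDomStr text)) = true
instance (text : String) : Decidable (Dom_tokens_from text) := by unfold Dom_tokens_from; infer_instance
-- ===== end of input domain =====

-- B replaces A's split/interleave/drop-trailing-separator pipeline by one character scan; return value proved equal.

-- ===== PORT A =====
def tokens_from (text : String) : List String :=
  let tokens := (PySem.Str.split? text " ").getD []   -- text.split(' '); sep is nonempty so split? is always `some`
  let output_tokens := tokens.foldl (fun acc token => (acc ++ [token]) ++ [" "]) []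
  PySem.List.slice output_tokens none (some (-1))     -- output_tokens[:-1]

-- ===== PORT B =====
def tokens_from_alt (text : String) : List String :=
  let p := text.toList.foldl
    (fun (st : List String × List Char) ch =>
      if ch = ' ' then (st.1 ++ [String.ofList st.2, " "], ([] : List Char))
      else (st.1, st.2 ++ [ch]))
    ([], [])
  p.1 ++ [String.ofList p.2]

-- ===== PRECONDITION & SPEC =====
def Spec_tokens_from (text : String) (out : List String) : Prop := out = tokens_from_alt text
instance (text : String) (out : List String) : Decidable (Spec_tokens_from text out) := by unfold Spec_tokens_from; infer_instance

-- ===== CLAIM (what is proved, stated in full; the proofs are below) =====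
def Claim_equal_tokens_from : Prop := ∀ (text : String), Dom_tokens_from text → Spec_tokens_from text (tokens_from text)

-- ===== LEMMAS AND PROOFS =====

/-- Prepend onto the head piece. -/
def pvConsHead (p : List Char) : List (List Char) → List (List Char)
  | [] => [p]
  | x :: xs => (p ++ x) :: xs

/-- Structural model of splitting on a single space. -/
def pvSpl : List Char → List (List Char)
  | [] => [[]]
  | c :: rest => if c = ' ' then [] :: pvSpl rest else pvConsHead [c] (pvSpl rest)

theorem pvSpl_ne_nil (cs : List Char) : pvSpl cs ≠ [] := by
  cases cs with
  | nil => simp [pvSpl]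
  | cons c rest =>
    simp only [pvSpl]
    split
    · simp
    · cases h : pvSpl rest <;> simp [pvConsHead]

theorem pvConsHead_consHead (p q : List Char) (l : List (List Char)) :
    pvConsHead p (pvConsHead q l) = pvConsHead (p ++ q) l := by
  cases l <;> simp [pvConsHead]

theorem pvConsHead_nil_left (l : List (List Char)) (h : l ≠ []) : pvConsHead [] l = l := by
  cases l with
  | nil => exact absurd rfl h
  | cons x xs => simp [pvConsHead]

theorem pv_go_spec : ∀ (fuel : Nat) (l cur : List Char) (acc : List (List Char)),
    l.length < fuel →
    PySem.Chars.splitOn.go [' '] fuel l cur acc = acc.reverse ++ pvConsHead cur.reverse (pvSpl l) := by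
  intro fuel
  induction fuel with
  | zero => intro l cur acc h; omega
  | succ n ih =>
    intro l cur acc h
    cases l with
    | nil =>
      simp [PySem.Chars.splitOn.go, pvSpl, pvConsHead]
    | cons c rest =>
      simp only [PySem.Chars.splitOn.go]
      by_cases hc : c = ' '
      · subst hc
        have hpre : [' '].isPrefixOf (' ' :: rest) = true := by simp [List.isPrefixOf]
        rw [if_pos hpre]
        simp only [List.length_cons, List.drop_succ_cons, List.length_nil, List.drop_zero]
        rw [ih rest [] (cur.reverse :: acc) (by simp at h; omega)]
        rw [List.reverse_nil, pvConsHead_nil_left _ (pvSpl_ne_nil rest)]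
        have h1 : pvSpl (' ' :: rest) = [] :: pvSpl rest := by simp [pvSpl]
        rw [h1]
        simp [pvConsHead]
      · have hpre : [' '].isPrefixOf (c :: rest) = false := by
          simp [List.isPrefixOf]; intro hcc; exact hc hcc.symm
        rw [if_neg (by simp [hpre])]
        rw [ih rest (c :: cur) acc (by simp at h ⊢; omega)]
        have : pvSpl (c :: rest) = pvConsHead [c] (pvSpl rest) := by simp [pvSpl, hc]
        rw [this, pvConsHead_consHead]
        simp

theorem pv_splitOn_eq (cs : List Char) : PySem.Chars.splitOn cs [' '] = pvSpl cs := by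
  unfold PySem.Chars.splitOn
  rw [pv_go_spec (cs.length + 1) cs [] [] (by omega)]
  simp [pvConsHead_nil_left _ (pvSpl_ne_nil cs)]

/-- A's interleave-and-drop-last, as one function of the pieces. -/
def pvG (ts : List (List Char)) : List String :=
  (ts.flatMap (fun t => [String.ofList t, " "])).dropLast

theorem pv_flatMap_ne_nil (ts : List (List Char)) (h : ts ≠ []) :
    ts.flatMap (fun t => [String.ofList t, " "]) ≠ [] := by
  cases ts with
  | nil => exact absurd rfl h
  | cons x xs => simp

theorem pv_A_fold (ts : List String) : ∀ (acc : List String),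
    ts.foldl (fun acc token => (acc ++ [token]) ++ [" "]) acc
      = acc ++ ts.flatMap (fun t => [t, " "]) := by
  induction ts with
  | nil => simp
  | cons t ts ih =>
    intro acc
    rw [List.foldl_cons, ih]
    simp [List.flatMap_cons]

theorem pvG_cons (t : List Char) (ts : List (List Char)) (h : ts ≠ []) :
    pvG (t :: ts) = String.ofList t :: " " :: pvG ts := by
  unfold pvG
  simp only [List.flatMap_cons]
  rw [List.dropLast_append_of_ne_nil (pv_flatMap_ne_nil ts h)]
  rfl

/-- B's loop body, named for the proofs. -/
def pvStep (st : List String × List Char) (ch : Char) : List String × List Char :=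
  if ch = ' ' then (st.1 ++ [String.ofList st.2, " "], ([] : List Char))
  else (st.1, st.2 ++ [ch])

theorem pv_B_loop : ∀ (cs : List Char) (out : List String) (cur : List Char),
    (cs.foldl pvStep (out, cur)).1 ++ [String.ofList (cs.foldl pvStep (out, cur)).2]
      = out ++ pvG (pvConsHead cur (pvSpl cs)) := by
  intro cs
  induction cs with
  | nil =>
    intro out cur
    simp [pvSpl, pvConsHead, pvG]
  | cons c rest ih =>
    intro out cur
    by_cases hc : c = ' '
    · subst hc
      rw [List.foldl_cons]
      have hstep : pvStep (out, cur) ' ' = (out ++ [String.ofList cur, " "], []) := by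
        simp [pvStep]
      rw [hstep, ih (out ++ [String.ofList cur, " "]) []]
      have h1 : pvSpl (' ' :: rest) = [] :: pvSpl rest := by simp [pvSpl]
      rw [h1]
      show _ = out ++ pvG ((cur ++ []) :: pvSpl rest)
      rw [pvG_cons _ _ (pvSpl_ne_nil rest),
          pvConsHead_nil_left _ (pvSpl_ne_nil rest)]
      simp
    · rw [List.foldl_cons]
      have hstep : pvStep (out, cur) c = (out, cur ++ [c]) := by
        simp [pvStep, hc]
      rw [hstep, ih out (cur ++ [c])]
      have h1 : pvSpl (c :: rest) = pvConsHead [c] (pvSpl rest) := by simp [pvSpl, hc]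
      rw [h1, pvConsHead_consHead]

-- ===== VERDICT (by name: the statement is the Claim_ definition above) =====
theorem tokens_from_spec : Claim_equal_tokens_from := by
  intro text _
  unfold Spec_tokens_from tokens_from tokens_from_alt
  have hsplit : (PySem.Str.split? text " ").getD []
      = (pvSpl text.toList).map String.ofList := by
    simp [PySem.Str.split?, PySem.Chars.split?, pv_splitOn_eq]
  simp only [hsplit, pv_A_fold, List.nil_append, PySem.List.slice_to_neg_one]
  rw [show (fun (st : List String × List Char) ch =>
        if ch = ' ' then (st.1 ++ [String.ofList st.2, " "], ([] : List Char))
        else (st.1, st.2 ++ [ch])) = pvStep from rfl, pv_B_loop text.toList [] []]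
  rw [pvConsHead_nil_left _ (pvSpl_ne_nil text.toList)]
  simp [pvG, List.flatMap_map]
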